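-- pv_equiv track=rewrite | github.com/petteriTeikari/deep-biblio-tools | scripts/archive/convert_drone_simple.py | clean_citations
-- ===== SOURCE A (Python) =====
-- def clean_citations(content):
--     """Replace markdown citations with LaTeX citations."""
--     result = []
--     i = 0
--
--     while i < len(content):
--         # Look for pattern [text](url)
--         if content[i] == "[" and i < len(content) - 1:
--             # Find the closing ]
--             j = i + 1
--             bracket_count = 1
--             while j < len(content) and bracket_count > 0:
--                 if content[j] == "[":
--                     bracket_count += 1
--                 elif content[j] == "]":
--                     bracket_count -= 1
--                 j += 1
--
--             if bracket_count == 0 and j < len(content) and content[j] == "(":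
--                 # Found potential citation, extract text
--                 text = content[i + 1 : j - 1]
--
--                 # Find closing )
--                 k = j + 1
--                 paren_count = 1
--                 while k < len(content) and paren_count > 0:
--                     if content[k] == "(":
--                         paren_count += 1
--                     elif content[k] == ")":
--                         paren_count -= 1
--                     k += 1
--
--                 if paren_count == 0:
--                     # Found complete citation pattern
--                     # Extract year from text
--                     year = None
--                     year_start = -1
--
--                     # Look for 4-digit year starting with 19 or 20
--                     for idx in range(len(text) - 3):
--                         if (
--                             text[idx : idx + 2] in ["19", "20"]
--                             and text[idx : idx + 4].isdigit()
--                             and (idx == 0 or not text[idx - 1].isdigit())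
--                             and (
--                                 idx + 4 >= len(text)
--                                 or not text[idx + 4].isdigit()
--                             )
--                         ):
--                             year = text[idx : idx + 4]
--                             year_start = idx
--                             break
--
--                     if year:
--                         # Extract authors (everything before the year)
--                         authors_part = text[:year_start].strip()
--                         # Remove trailing parenthesis and spaces
--                         while authors_part and authors_part[-1] in " (":
--                             authors_part = authors_part[:-1]
--
--                         # Generate citation key
--                         first_author = (
--                             authors_part.split()[0]
--                             if authors_part
--                             else "unknown"
--                         )
--                         # Keep only letters
--                         first_author_clean = "".join(
--                             c for c in first_author if c.isalpha()
--                         ).lower()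
--                         key = f"{first_author_clean}{year}"
--                     else:
--                         # No year found, use cleaned text
--                         key = "".join(c for c in text if c.isalnum()).lower()[
--                             :20
--                         ]
--
--                     # Add LaTeX citation
--                     result.append(f"\\cite{{{key}}}")
--                     i = k
--                     continue
--
--         result.append(content[i])
--         i += 1
--
--     return "".join(result)
-- ===== SOURCE B (Python) =====
-- def _match_table(content, open_ch, close_ch):
--     """One stack pass: position of each matched opener -> its matching closer."""
--     match = {}
--     stack = []
--     for pos, ch in enumerate(content):
--         if ch == open_ch:
--             stack.append(pos)
--         elif ch == close_ch and stack:
--             match[stack.pop()] = pos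
--     return match
--
--
-- def _make_key(text):
--     """Citation key for the bracketed text (same rule as the markdown scanner)."""
--     # find the first maximal digit run of length exactly 4 starting with 19/20
--     year = None
--     year_start = -1
--     i = 0
--     n = len(text)
--     while i < n:
--         if text[i].isdigit():
--             j = i
--             while j < n and text[j].isdigit():
--                 j += 1
--             if j - i == 4 and text[i : i + 2] in ("19", "20"):
--                 year = text[i:j]
--                 year_start = i
--                 break
--             i = j
--         else:
--             i += 1
--     if year is None:
--         return "".join(c for c in text if c.isalnum()).lower()[:20]
--     authors = text[:year_start].strip()
--     while authors and authors[-1] in " (":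
--         authors = authors[:-1]
--     first = authors.split()[0] if authors else "unknown"
--     return "".join(c for c in first if c.isalpha()).lower() + year
--
--
-- def clean_citations(content):
--     """Replace markdown citations with LaTeX citations."""
--     bmatch = _match_table(content, "[", "]")
--     pmatch = _match_table(content, "(", ")")
--     out = []
--     i = 0
--     n = len(content)
--     while i < n:
--         c = content[i]
--         if c == "[" and i in bmatch and bmatch[i] + 1 in pmatch:
--             m = bmatch[i]
--             out.append("\\cite{" + _make_key(content[i + 1 : m]) + "}")
--             i = pmatch[m + 1] + 1
--         else:
--             out.append(c)
--             i += 1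
--     return "".join(out)
-- ===== Notes on version B (the rewrite author's own statement) =====
-- stated objective: alternative
-- what changed: B precomputes matching bracket and paren positions with one stack pass each and looks them up in O(1), replacing A's per-position counter rescans (quadratic in the worst case), and finds the year by skipping maximal digit runs instead of testing every 4-char window.
import Mathlib
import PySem

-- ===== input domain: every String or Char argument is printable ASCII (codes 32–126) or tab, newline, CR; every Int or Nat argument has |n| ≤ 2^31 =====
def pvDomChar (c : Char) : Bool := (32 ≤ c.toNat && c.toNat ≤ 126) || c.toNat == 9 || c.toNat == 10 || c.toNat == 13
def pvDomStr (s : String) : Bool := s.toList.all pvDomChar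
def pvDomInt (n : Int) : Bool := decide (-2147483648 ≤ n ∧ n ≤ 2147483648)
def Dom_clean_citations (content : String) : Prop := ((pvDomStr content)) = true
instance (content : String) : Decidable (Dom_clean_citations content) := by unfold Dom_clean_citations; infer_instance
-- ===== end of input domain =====

-- B replaces A's per-position counter rescans by two precomputed stack-pass match
-- tables (and finds the year by skipping maximal digit runs); same return value.
-- Loops are ported as structural recursion on a fuel bound (always sufficient:
-- every loop advances its index, so `length + 1` steps cover any run).

-- ===== SHARED HELPERS (Python code that is literally identical in Source A and Source B) =====

-- while authors_part and authors_part[-1] in " (": authors_part = authors_part[:-1]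
def pvTrim : Nat → List Char → List Char
  | 0, ap => ap
  | fuel + 1, ap =>
    if ap ≠ [] ∧ (ap.getLastD ' ' = ' ' ∨ ap.getLastD ' ' = '(') then pvTrim fuel ap.dropLast
    else ap

-- authors_part → first_author → "".join(c for c in first_author if c.isalpha()).lower() + year
def pvKeyYear (t : List Char) (ys : Nat) (year : List Char) : List Char :=
  let s := PySem.Chars.strip (PySem.List.slice t none (some (ys : Int)))
  let ap := pvTrim s.length s
  let fa := if ap ≠ [] then (PySem.Chars.split₀ ap).getD 0 [] else "unknown".toList
  PySem.Chars.lower (fa.filter PySem.Chars.isalpha) ++ year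

-- "".join(c for c in text if c.isalnum()).lower()[:20]
def pvKeyNoYear (t : List Char) : List Char :=
  PySem.List.slice (PySem.Chars.lower (t.filter PySem.Chars.isalnum)) none (some (20 : Int))

-- f"\\cite{{{key}}}"
def pvCite (key : List Char) : List Char := "\\cite{".toList ++ key ++ "}".toList

-- ===== PORT A =====
-- A's inner `while` loops: scan from j with a nesting counter; returns the final (j, count).
def pvScanA (cs : List Char) (o c : Char) : Nat → Nat → Nat → Nat × Nat
  | 0, j, cnt => (j, cnt)
  | fuel + 1, j, cnt =>
    if j < cs.length ∧ 0 < cnt then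
      pvScanA cs o c fuel (j + 1)
        (if cs.getD j ' ' = o then cnt + 1 else if cs.getD j ' ' = c then cnt - 1 else cnt)
    else (j, cnt)

-- A's year condition at index idx (the big `if` in the `for idx` loop)
def pvCondA (t : List Char) (idx : Nat) : Bool :=
  ((PySem.List.slice t (some (idx : Int)) (some ((idx : Int) + 2)) == "19".toList)
    || (PySem.List.slice t (some (idx : Int)) (some ((idx : Int) + 2)) == "20".toList))
  && PySem.Chars.strIsdigit (PySem.List.slice t (some (idx : Int)) (some ((idx : Int) + 4)))
  && (idx == 0 || !(PySem.Chars.isdigit (t.getD (idx - 1) ' ')))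
  && (decide (t.length ≤ idx + 4) || !(PySem.Chars.isdigit (t.getD (idx + 4) ' ')))

-- for idx in range(len(text) - 3): if cond: break  — returns year_start
def pvYearA (t : List Char) : Nat → Nat → Option Nat
  | 0, _ => none
  | fuel + 1, idx =>
    if idx < t.length - 3 then
      (if pvCondA t idx then some idx else pvYearA t fuel (idx + 1))
    else none

def pvMakeKeyA (t : List Char) : List Char :=
  match pvYearA t (t.length + 1) 0 with
  | some ys => pvKeyYear t ys (PySem.List.slice t (some (ys : Int)) (some ((ys : Int) + 4)))
  | none => pvKeyNoYear t

-- A's main while loop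
def pvLoopA (cs : List Char) : Nat → Nat → List Char → List Char
  | 0, _, acc => acc
  | fuel + 1, i, acc =>
    if i < cs.length then
      if cs.getD i ' ' = '[' ∧ i < cs.length - 1 then
        if (pvScanA cs '[' ']' (cs.length + 1) (i + 1) 1).2 = 0
            ∧ (pvScanA cs '[' ']' (cs.length + 1) (i + 1) 1).1 < cs.length
            ∧ cs.getD (pvScanA cs '[' ']' (cs.length + 1) (i + 1) 1).1 ' ' = '(' then
          if (pvScanA cs '(' ')' (cs.length + 1)
              ((pvScanA cs '[' ']' (cs.length + 1) (i + 1) 1).1 + 1) 1).2 = 0 then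
            pvLoopA cs fuel
              (pvScanA cs '(' ')' (cs.length + 1)
                ((pvScanA cs '[' ']' (cs.length + 1) (i + 1) 1).1 + 1) 1).1
              (acc ++ pvCite (pvMakeKeyA (PySem.List.slice cs (some ((i : Int) + 1))
                (some (((pvScanA cs '[' ']' (cs.length + 1) (i + 1) 1).1 : Int) - 1)))))
          else pvLoopA cs fuel (i + 1) (acc ++ [cs.getD i ' '])
        else pvLoopA cs fuel (i + 1) (acc ++ [cs.getD i ' '])
      else pvLoopA cs fuel (i + 1) (acc ++ [cs.getD i ' '])
    else acc

def clean_citations (content : String) : String :=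
  String.ofList (pvLoopA content.toList (content.toList.length + 1) 0 [])

-- ===== PORT B =====
-- _match_table: one stack pass; dict from each matched opener position to its closer.
def pvMatchAux (o c : Char) : List Char → Nat → List Nat → PySem.Dict Nat Nat → PySem.Dict Nat Nat
  | [], _, _, d => d
  | ch :: rest, pos, stk, d =>
    if ch = o then pvMatchAux o c rest (pos + 1) (pos :: stk) d
    else if ch = c then
      match stk with
      | [] => pvMatchAux o c rest (pos + 1) [] d
      | p :: stk' => pvMatchAux o c rest (pos + 1) stk' (d.insert p pos)
    else pvMatchAux o c rest (pos + 1) stk d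

def pvMatch (cs : List Char) (o c : Char) : PySem.Dict Nat Nat :=
  pvMatchAux o c cs 0 [] PySem.Dict.empty

-- inner `while j < n and text[j].isdigit(): j += 1`
def pvRunEnd (t : List Char) : Nat → Nat → Nat
  | 0, j => j
  | fuel + 1, j =>
    if j < t.length ∧ PySem.Chars.isdigit (t.getD j ' ') then pvRunEnd t fuel (j + 1) else j

-- _find_year's outer while loop; returns (start, end) of the year run
def pvYearB (t : List Char) : Nat → Nat → Option (Nat × Nat)
  | 0, _ => none
  | fuel + 1, i =>
    if i < t.length then
      if PySem.Chars.isdigit (t.getD i ' ') then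
        if pvRunEnd t t.length i - i = 4
            ∧ ((PySem.List.slice t (some (i : Int)) (some ((i : Int) + 2)) = "19".toList)
              ∨ (PySem.List.slice t (some (i : Int)) (some ((i : Int) + 2)) = "20".toList))
        then some (i, pvRunEnd t t.length i) else pvYearB t fuel (pvRunEnd t t.length i)
      else pvYearB t fuel (i + 1)
    else none

def pvMakeKeyB (t : List Char) : List Char :=
  match pvYearB t (t.length + 1) 0 with
  | some (i, j) => pvKeyYear t i (PySem.List.slice t (some (i : Int)) (some (j : Int)))
  | none => pvKeyNoYear t

-- B's main while loop: pure table lookups, no rescans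
def pvLoopB (cs : List Char) (bm pm : PySem.Dict Nat Nat) : Nat → Nat → List Char → List Char
  | 0, _, acc => acc
  | fuel + 1, i, acc =>
    if i < cs.length then
      if cs.getD i ' ' = '[' then
        match bm.get? i with
        | some m =>
          match pm.get? (m + 1) with
          | some e =>
            pvLoopB cs bm pm fuel (e + 1)
              (acc ++ pvCite (pvMakeKeyB (PySem.List.slice cs (some ((i : Int) + 1)) (some (m : Int)))))
          | none => pvLoopB cs bm pm fuel (i + 1) (acc ++ [cs.getD i ' '])
        | none => pvLoopB cs bm pm fuel (i + 1) (acc ++ [cs.getD i ' '])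
      else pvLoopB cs bm pm fuel (i + 1) (acc ++ [cs.getD i ' '])
    else acc

def clean_citations_alt (content : String) : String :=
  String.ofList (pvLoopB content.toList (pvMatch content.toList '[' ']')
    (pvMatch content.toList '(' ')') (content.toList.length + 1) 0 [])

-- ===== PRECONDITION & SPEC =====
def Spec_clean_citations (content : String) (out : String) : Prop := out = clean_citations_alt content
instance (content : String) (out : String) : Decidable (Spec_clean_citations content out) := by unfold Spec_clean_citations; infer_instance

-- ===== CLAIM (what is proved, stated in full; the proofs are below) =====
def Claim_equal_clean_citations : Prop := ∀ (content : String), Dom_clean_citations content → Spec_clean_citations content (clean_citations content)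

-- ===== LEMMAS AND PROOFS =====

-- ---- windowed counter scan (proof-only): A's scan cut off at `stop` ----
def pvScanTo (cs : List Char) (o c : Char) (stop j cnt : Nat) : Nat × Nat :=
  if j < stop ∧ 0 < cnt then
    pvScanTo cs o c stop (j + 1)
      (if cs.getD j ' ' = o then cnt + 1 else if cs.getD j ' ' = c then cnt - 1 else cnt)
  else (j, cnt)
termination_by stop - j
decreasing_by rename_i h; omega

-- the counter update A applies at one character
def pvStep (o c ch : Char) (cnt : Nat) : Nat :=
  if ch = o then cnt + 1 else if ch = c then cnt - 1 else cnt

theorem pvScanTo_of_ge (cs : List Char) (o c : Char) (stop j cnt : Nat) (h : stop ≤ j) :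
    pvScanTo cs o c stop j cnt = (j, cnt) := by
  rw [pvScanTo]; split <;> [omega; rfl]

theorem pvScanA_eq_scanTo (cs : List Char) (o c : Char) :
    ∀ (fuel j cnt : Nat), cs.length - j < fuel →
      pvScanA cs o c fuel j cnt = pvScanTo cs o c cs.length j cnt := by
  intro fuel
  induction fuel with
  | zero => intro j cnt h; omega
  | succ n ih =>
    intro j cnt h
    rw [pvScanA, pvScanTo]
    split
    · next hg => exact ih (j + 1) _ (by omega)
    · rfl

theorem pvScanTo_cnt_zero (cs : List Char) (o c : Char) (stop j : Nat) :
    pvScanTo cs o c stop j 0 = (j, 0) := by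
  rw [pvScanTo]; simp

theorem pvScanTo_succ (cs : List Char) (o c : Char) (stop j cnt : Nat) (h : j ≤ stop) :
    pvScanTo cs o c (stop + 1) j cnt =
      (if (pvScanTo cs o c stop j cnt).2 = 0 then pvScanTo cs o c stop j cnt
       else (stop + 1, pvStep o c (cs.getD stop ' ') (pvScanTo cs o c stop j cnt).2)) := by
  suffices H : ∀ (fuel j cnt : Nat), j ≤ stop → stop - j ≤ fuel →
      pvScanTo cs o c (stop + 1) j cnt =
        (if (pvScanTo cs o c stop j cnt).2 = 0 then pvScanTo cs o c stop j cnt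
         else (stop + 1, pvStep o c (cs.getD stop ' ') (pvScanTo cs o c stop j cnt).2)) from
    H (stop - j) j cnt h le_rfl
  intro fuel
  induction fuel with
  | zero =>
    intro j cnt hj hf
    have hj' : j = stop := by omega
    subst hj'
    rw [pvScanTo_of_ge cs o c j j cnt le_rfl]
    by_cases hc : cnt = 0
    · subst hc
      simp [pvScanTo]
    · rw [pvScanTo]
      simp only [hc, if_false]
      rw [if_pos ⟨by omega, by omega⟩, pvScanTo_of_ge cs o c (j + 1) (j + 1) _ le_rfl]
      simp [pvStep]
  | succ n ih =>
    intro j cnt hj hf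
    by_cases hjs : j = stop
    · subst hjs
      rw [pvScanTo_of_ge cs o c j j cnt le_rfl]
      by_cases hc : cnt = 0
      · subst hc; simp [pvScanTo]
      · rw [pvScanTo]
        simp only [hc, if_false]
        rw [if_pos ⟨by omega, by omega⟩, pvScanTo_of_ge cs o c (j + 1) (j + 1) _ le_rfl]
        simp [pvStep]
    · by_cases hc : 0 < cnt
      · have hstep1 : pvScanTo cs o c (stop + 1) j cnt = pvScanTo cs o c (stop + 1) (j + 1)
            (if cs.getD j ' ' = o then cnt + 1 else if cs.getD j ' ' = c then cnt - 1 else cnt) := by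
          rw [pvScanTo]; rw [if_pos ⟨by omega, hc⟩]
        have hstep2 : pvScanTo cs o c stop j cnt = pvScanTo cs o c stop (j + 1)
            (if cs.getD j ' ' = o then cnt + 1 else if cs.getD j ' ' = c then cnt - 1 else cnt) := by
          rw [pvScanTo]; rw [if_pos ⟨by omega, hc⟩]
        rw [hstep1, hstep2]
        exact ih (j + 1)
          (if cs.getD j ' ' = o then cnt + 1 else if cs.getD j ' ' = c then cnt - 1 else cnt)
          (by omega) (by omega)
      · have hc0 : cnt = 0 := by omega
        subst hc0
        rw [pvScanTo_cnt_zero, pvScanTo_cnt_zero, if_pos rfl]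

theorem pvScanTo_mono (cs : List Char) (o c : Char) (stop stop' j cnt v : Nat)
    (hz : pvScanTo cs o c stop j cnt = (v, 0)) (hs : stop ≤ stop') :
    pvScanTo cs o c stop' j cnt = (v, 0) := by
  induction hs with
  | refl => exact hz
  | step h ih =>
    rename_i stop''
    by_cases hj : j ≤ stop''
    · rw [pvScanTo_succ cs o c stop'' j cnt hj, ih, if_pos rfl]
    · rw [pvScanTo_of_ge cs o c stop'' j cnt (by omega)] at ih
      cases ih
      rw [pvScanTo_of_ge cs o c (stop'' + 1) j 0 (by omega)]

-- ---- the stack pass computes exactly what A's counter rescans compute ----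
theorem pvMatchAux_inv (cs : List Char) (o c : Char) (hoc : o ≠ c) :
    ∀ (rest : List Char) (pos : Nat) (stk : List Nat) (d : PySem.Dict Nat Nat),
      pos + rest.length = cs.length → rest = cs.drop pos →
      (∀ p v, d.get? p = some v → p < v ∧ v < cs.length ∧ cs.getD p ' ' = o ∧
          pvScanTo cs o c cs.length (p + 1) 1 = (v + 1, 0)) →
      (∀ q (hq : q < stk.length), stk[q] < pos ∧ cs.getD (stk[q]) ' ' = o ∧
          pvScanTo cs o c pos (stk[q] + 1) 1 = (pos, q + 1)) →
      (∀ i, i < pos → cs.getD i ' ' = o → ((d.get? i).isSome ∨ i ∈ stk)) →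
      (∀ p v, (pvMatchAux o c rest pos stk d).get? p = some v → p < v ∧ v < cs.length ∧
          cs.getD p ' ' = o ∧ pvScanTo cs o c cs.length (p + 1) 1 = (v + 1, 0)) ∧
      (∀ i, i < cs.length → cs.getD i ' ' = o → (pvMatchAux o c rest pos stk d).get? i = none →
          (pvScanTo cs o c cs.length (i + 1) 1).2 ≠ 0) := by
  intro rest
  induction rest with
  | nil =>
    intro pos stk d hlen _ hd hs hc
    simp only [List.length_nil, Nat.add_zero] at hlen
    subst hlen
    simp only [pvMatchAux]
    refine ⟨hd, ?_⟩
    intro i hi hchar hnone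
    rcases hc i hi hchar with h | h
    · rw [hnone] at h; simp at h
    · obtain ⟨q, hq, rfl⟩ := List.mem_iff_getElem.mp h
      rw [(hs q hq).2.2]
      omega
  | cons ch rest ih =>
    intro pos stk d hlen hdrop hd hs hc
    have hpos : pos < cs.length := by simp at hlen; omega
    have hch : ch = cs[pos] := by
      rw [List.drop_eq_getElem_cons hpos] at hdrop
      exact (List.cons.injEq _ _ _ _ ▸ hdrop).1
    have hrest : rest = cs.drop (pos + 1) := by
      rw [List.drop_eq_getElem_cons hpos] at hdrop
      exact (List.cons.injEq _ _ _ _ ▸ hdrop).2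
    have hchD : cs.getD pos ' ' = ch := by rw [List.getD_eq_getElem cs ' ' hpos, hch]
    have hlen' : pos + 1 + rest.length = cs.length := by simp at hlen ⊢; omega
    -- extend every stack segment by the character at pos
    have hstep : ∀ q (hq : q < stk.length),
        pvScanTo cs o c (pos + 1) (stk[q] + 1) 1 = (pos + 1, pvStep o c ch (q + 1)) := by
      intro q hq
      obtain ⟨h1, _, h3⟩ := hs q hq
      rw [pvScanTo_succ cs o c pos (stk[q] + 1) 1 (by omega), h3, if_neg (by simp)]
      rw [hchD]
    simp only [pvMatchAux]
    split
    · -- ch = o : push pos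
      next hcho =>
      refine ih (pos + 1) (pos :: stk) d hlen' hrest hd ?_ ?_
      · intro q hq
        match q with
        | 0 =>
          simp only [List.getElem_cons_zero]
          refine ⟨by omega, by rw [hchD, hcho], ?_⟩
          exact pvScanTo_of_ge cs o c (pos + 1) (pos + 1) 1 le_rfl
        | q + 1 =>
          simp only [List.getElem_cons_succ]
          have hq' : q < stk.length := by simpa using hq
          refine ⟨by have := (hs q hq').1; omega, (hs q hq').2.1, ?_⟩
          rw [hstep q hq']
          simp [pvStep, hcho]
      · intro i hi hchar
        by_cases hip : i = pos
        · subst hip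
          exact Or.inr (List.mem_cons_self ..)
        · rcases hc i (by omega) hchar with h | h
          · exact Or.inl h
          · exact Or.inr (List.mem_cons_of_mem _ h)
    · split
      · -- ch = c
        next hcho hchc =>
        cases stk with
        | nil =>
          refine ih (pos + 1) [] d hlen' hrest hd (by simp) ?_
          intro i hi hchar
          by_cases hip : i = pos
          · subst hip
            rw [hchD] at hchar
            exact absurd (hchar.symm.trans hchc) hoc
          · rcases hc i (by omega) hchar with h | h
            · exact Or.inl h
            · exact absurd h (List.not_mem_nil)
        | cons p stk' =>
          have hp0 := hs 0 (by simp)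
          simp only [List.getElem_cons_zero] at hp0
          have hpscan : pvScanTo cs o c cs.length (p + 1) 1 = (pos + 1, 0) := by
            refine pvScanTo_mono cs o c (pos + 1) cs.length (p + 1) 1 (pos + 1) ?_ (by omega)
            rw [pvScanTo_succ cs o c pos (p + 1) 1 (by omega), hp0.2.2, if_neg (by simp), hchD]
            simp [pvStep, hchc, if_neg (fun h : c = o => hoc h.symm)]
          refine ih (pos + 1) stk' (d.insert p pos) hlen' hrest ?_ ?_ ?_
          · intro k v hkv
            by_cases hkp : k = p
            · subst hkp
              rw [PySem.Dict.get?_insert_self] at hkv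
              cases hkv
              exact ⟨hp0.1, by omega, hp0.2.1, hpscan⟩
            · rw [PySem.Dict.get?_insert_of_ne _ _ hkp] at hkv
              exact hd k v hkv
          · intro q hq
            have hq' : q + 1 < (p :: stk').length := by simpa using hq
            have h1 := hs (q + 1) hq'
            simp only [List.getElem_cons_succ] at h1
            have h2 := hstep (q + 1) hq'
            simp only [List.getElem_cons_succ] at h2
            refine ⟨by have := h1.1; omega, h1.2.1, ?_⟩
            rw [h2]
            simp [pvStep, hchc, if_neg (fun h : c = o => hoc h.symm)]
          · intro i hi hchar
            by_cases hip : i = pos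
            · subst hip
              rw [hchD] at hchar
              exact absurd (hchar.symm.trans hchc) hoc
            · rcases hc i (by omega) hchar with h | h
              · left
                by_cases hipp : i = p
                · subst hipp; simp [PySem.Dict.get?_insert_self]
                · rwa [PySem.Dict.get?_insert_of_ne _ _ hipp]
              · rcases List.mem_cons.mp h with h' | h'
                · subst h'; left; simp [PySem.Dict.get?_insert_self]
                · exact Or.inr h'
      · -- other character
        next hcho hchc =>
        refine ih (pos + 1) stk d hlen' hrest hd ?_ ?_
        · intro q hq
          obtain ⟨h1, h2, _⟩ := hs q hq
          refine ⟨by omega, h2, ?_⟩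
          rw [hstep q hq]
          simp [pvStep, hcho, hchc]
        · intro i hi hchar
          by_cases hip : i = pos
          · subst hip
            rw [hchD] at hchar
            exact absurd hchar hcho
          · exact hc i (by omega) hchar

theorem pvMatch_some (cs : List Char) (o c : Char) (hoc : o ≠ c) (i m : Nat)
    (h : (pvMatch cs o c).get? i = some m) :
    i < m ∧ m < cs.length ∧ cs.getD i ' ' = o ∧
      pvScanTo cs o c cs.length (i + 1) 1 = (m + 1, 0) := by
  exact (pvMatchAux_inv cs o c hoc cs 0 [] PySem.Dict.empty (by simp) (by simp)
    (by intro p v h'; simp [PySem.Dict.empty, PySem.Dict.get?] at h') (by simp) (by simp)).1 i m h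

theorem pvMatch_none (cs : List Char) (o c : Char) (hoc : o ≠ c) (i : Nat)
    (hi : i < cs.length) (hchar : cs.getD i ' ' = o)
    (h : (pvMatch cs o c).get? i = none) : (pvScanTo cs o c cs.length (i + 1) 1).2 ≠ 0 := by
  exact (pvMatchAux_inv cs o c hoc cs 0 [] PySem.Dict.empty (by simp) (by simp)
    (by intro p v h'; simp [PySem.Dict.empty, PySem.Dict.get?] at h') (by simp) (by simp)).2
    i hi hchar h

-- ---- the year search: A's 4-char windows = B's maximal digit runs ----
theorem pvSlice2 (t : List Char) (i : Nat) :
    PySem.List.slice t (some (i : Int)) (some ((i : Int) + 2)) = (t.drop i).take 2 := by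
  have h : ((i : Int) + 2) = ((i : Int) + ((2 : Nat) : Int)) := by norm_num
  rw [h, PySem.List.slice_natCast_add]

theorem pvSlice4 (t : List Char) (i : Nat) :
    PySem.List.slice t (some (i : Int)) (some ((i : Int) + 4)) = (t.drop i).take 4 := by
  have h : ((i : Int) + 4) = ((i : Int) + ((4 : Nat) : Int)) := by norm_num
  rw [h, PySem.List.slice_natCast_add]

theorem pvCondA_iff (t : List Char) (idx : Nat) :
    pvCondA t idx = true ↔
      (((t.drop idx).take 2 = "19".toList ∨ (t.drop idx).take 2 = "20".toList)
        ∧ PySem.Chars.strIsdigit ((t.drop idx).take 4) = true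
        ∧ (idx = 0 ∨ PySem.Chars.isdigit (t.getD (idx - 1) ' ') = false)
        ∧ (t.length ≤ idx + 4 ∨ PySem.Chars.isdigit (t.getD (idx + 4) ' ') = false)) := by
  unfold pvCondA
  rw [pvSlice2, pvSlice4]
  simp only [Bool.and_eq_true, Bool.or_eq_true, beq_iff_eq, Bool.not_eq_eq_eq_not,
    Bool.not_true, decide_eq_true_eq]
  tauto

theorem pvStrIsdigit_iff (s : List Char) :
    PySem.Chars.strIsdigit s = true ↔ (s ≠ [] ∧ ∀ x ∈ s, PySem.Chars.isdigit x = true) := by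
  simp [PySem.Chars.strIsdigit, List.all_eq_true]

theorem pvTake_digits (t : List Char) (i m : Nat) (him : i < m) (hm : m ≤ t.length)
    (hd : ∀ k, i ≤ k → k < m → PySem.Chars.isdigit (t.getD k ' ') = true) :
    PySem.Chars.strIsdigit ((t.drop i).take (m - i)) = true := by
  rw [pvStrIsdigit_iff]
  refine ⟨?_, ?_⟩
  · have hlen : ((t.drop i).take (m - i)).length = m - i := by
      simp [List.length_take, List.length_drop]; omega
    intro hnil
    rw [hnil] at hlen
    simp at hlen
    omega
  · intro x hx
    obtain ⟨k, hk, rfl⟩ := List.getElem_of_mem hx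
    have hk' : k < m - i := by
      have := hk; simp [List.length_take, List.length_drop] at this; omega
    rw [List.getElem_take, List.getElem_drop]
    have hik : i + k < t.length := by omega
    rw [← List.getD_eq_getElem t ' ' hik]
    exact hd (i + k) (by omega) (by omega)

theorem pvTake4_digits (t : List Char) (i : Nat) (hi4 : i + 4 ≤ t.length)
    (h : PySem.Chars.strIsdigit ((t.drop i).take 4) = true) :
    ∀ k, i ≤ k → k < i + 4 → PySem.Chars.isdigit (t.getD k ' ') = true := by
  intro k hk1 hk2
  obtain ⟨-, hall⟩ := (pvStrIsdigit_iff _).mp h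
  have hlt : k - i < ((t.drop i).take 4).length := by
    simp [List.length_take, List.length_drop]; omega
  have := hall _ (List.getElem_mem hlt)
  rw [List.getElem_take, List.getElem_drop] at this
  simp only [Nat.add_sub_cancel' hk1] at this
  rwa [List.getD_eq_getElem t ' ' (by omega)]

theorem pvCondA_false_of_prev_digit (t : List Char) (idx : Nat) (h1 : idx ≠ 0)
    (h2 : PySem.Chars.isdigit (t.getD (idx - 1) ' ') = true) : pvCondA t idx = false := by
  rw [Bool.eq_false_iff]
  intro hc
  rcases ((pvCondA_iff t idx).mp hc).2.2.1 with h | h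
  · exact h1 h
  · rw [h2] at h; cases h

theorem pvCondA_false_of_nondigit (t : List Char) (idx : Nat) (hi : idx < t.length)
    (h : PySem.Chars.isdigit (t.getD idx ' ') = false) : pvCondA t idx = false := by
  rw [Bool.eq_false_iff]
  intro hc
  have h4 := ((pvCondA_iff t idx).mp hc).2.1
  obtain ⟨-, hall⟩ := (pvStrIsdigit_iff _).mp h4
  have hlt : 0 < ((t.drop idx).take 4).length := by
    simp [List.length_take, List.length_drop]; omega
  have := hall _ (List.getElem_mem hlt)
  rw [List.getElem_take, List.getElem_drop] at this
  rw [← List.getD_eq_getElem t ' ' (by omega)] at this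
  simp only [Nat.add_zero] at this
  rw [h] at this
  cases this

theorem pvYearA_ge (t : List Char) (fuel idx : Nat) (h : t.length - 3 ≤ idx) :
    pvYearA t fuel idx = none := by
  cases fuel with
  | zero => rfl
  | succ n => rw [pvYearA, if_neg (by omega)]

theorem pvYearA_step (t : List Char) (fuel idx : Nat) (h : pvCondA t idx = false) :
    pvYearA t (fuel + 1) idx = pvYearA t fuel (idx + 1) := by
  by_cases h1 : idx < t.length - 3
  · rw [pvYearA, if_pos h1, h]
    simp
  · rw [pvYearA_ge t (fuel + 1) idx (by omega), pvYearA_ge t fuel (idx + 1) (by omega)]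

theorem pvYearA_irrel (t : List Char) :
    ∀ (f1 f2 idx : Nat), t.length - idx < f1 → t.length - idx < f2 →
      pvYearA t f1 idx = pvYearA t f2 idx := by
  intro f1
  induction f1 with
  | zero => intro f2 idx h1 h2; omega
  | succ n ih =>
    intro f2 idx h1 h2
    by_cases hge : t.length - 3 ≤ idx
    · rw [pvYearA_ge t _ idx hge, pvYearA_ge t _ idx hge]
    · cases f2 with
      | zero => omega
      | succ m =>
        have hL : pvYearA t (n + 1) idx
            = if pvCondA t idx then some idx else pvYearA t n (idx + 1) := by
          rw [pvYearA, if_pos (by omega)]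
        have hR : pvYearA t (m + 1) idx
            = if pvCondA t idx then some idx else pvYearA t m (idx + 1) := by
          rw [pvYearA, if_pos (by omega)]
        rw [hL, hR]
        by_cases hc : pvCondA t idx = true
        · rw [hc]; simp
        · rw [Bool.not_eq_true] at hc
          rw [hc]
          simp only [Bool.false_eq_true, if_false]
          exact ih m (idx + 1) (by omega) (by omega)

theorem pvYearA_chain (t : List Char) :
    ∀ (d a fuel fuel' b : Nat), a ≤ b → b - a ≤ d →
      t.length - a < fuel → t.length - b < fuel' →
      (∀ k, a ≤ k → k < b → k < t.length - 3 → pvCondA t k = false) →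
      pvYearA t fuel a = pvYearA t fuel' b := by
  intro d
  induction d with
  | zero =>
    intro a fuel fuel' b hab hd h1 h2 _
    have heq : a = b := by omega
    subst heq
    exact pvYearA_irrel t fuel fuel' a h1 h2
  | succ n ih =>
    intro a fuel fuel' b hab hd h1 h2 hk
    by_cases heq : a = b
    · subst heq; exact pvYearA_irrel t fuel fuel' a h1 h2
    · by_cases hge : t.length - 3 ≤ a
      · rw [pvYearA_ge t fuel a hge, pvYearA_ge t fuel' b (by omega)]
      · cases fuel with
        | zero => omega
        | succ m =>
          rw [pvYearA_step t m a (hk a le_rfl (by omega) (by omega))]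
          exact ih (a + 1) m fuel' b (by omega) (by omega) (by omega) h2
            (fun k hk1 hk2 hk3 => hk k (by omega) hk2 hk3)

theorem pvRunEnd_ge (t : List Char) : ∀ (fuel j : Nat), j ≤ pvRunEnd t fuel j := by
  intro fuel
  induction fuel with
  | zero => intro j; simp [pvRunEnd]
  | succ n ih =>
    intro j
    rw [pvRunEnd]
    split
    · exact le_trans (by omega) (ih (j + 1))
    · omega

theorem pvRunEnd_le (t : List Char) :
    ∀ (fuel j : Nat), j ≤ t.length → pvRunEnd t fuel j ≤ t.length := by
  intro fuel
  induction fuel with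
  | zero => intro j h; simpa [pvRunEnd]
  | succ n ih =>
    intro j h
    rw [pvRunEnd]
    split
    · next hg => exact ih (j + 1) (by omega)
    · omega

theorem pvRunEnd_digits (t : List Char) :
    ∀ (fuel j k : Nat), j ≤ k → k < pvRunEnd t fuel j →
      k < t.length ∧ PySem.Chars.isdigit (t.getD k ' ') = true := by
  intro fuel
  induction fuel with
  | zero => intro j k h1 h2; simp [pvRunEnd] at h2; omega
  | succ n ih =>
    intro j k h1 h2
    rw [pvRunEnd] at h2
    split at h2
    · next hg =>
      by_cases hkj : k = j
      · subst hkj; exact ⟨hg.1, hg.2⟩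
      · exact ih (j + 1) k (by omega) h2
    · omega

theorem pvRunEnd_stop (t : List Char) :
    ∀ (fuel j : Nat), t.length - j ≤ fuel → pvRunEnd t fuel j < t.length →
      PySem.Chars.isdigit (t.getD (pvRunEnd t fuel j) ' ') = false := by
  intro fuel
  induction fuel with
  | zero =>
    intro j hf hlt
    simp [pvRunEnd] at hlt
    omega
  | succ n ih =>
    intro j hf hlt
    by_cases hg : j < t.length ∧ PySem.Chars.isdigit (t.getD j ' ') = true
    · rw [pvRunEnd, if_pos hg] at hlt ⊢
      exact ih (j + 1) (by omega) hlt
    · rw [pvRunEnd, if_neg hg] at hlt ⊢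
      have h2 := not_and.mp hg hlt
      simp only [Bool.not_eq_true] at h2
      exact h2

theorem pvRunEnd_max (t : List Char) (m : Nat) (hm : m ≤ t.length) :
    ∀ (fuel j : Nat), t.length - j ≤ fuel →
      (∀ k, j ≤ k → k < m → PySem.Chars.isdigit (t.getD k ' ') = true) →
      m ≤ max j (pvRunEnd t fuel j) := by
  intro fuel
  induction fuel with
  | zero =>
    intro j hf hdig
    by_cases hjm : m ≤ j
    · omega
    · have h1 := hdig j le_rfl (by omega)
      omega
  | succ n ih =>
    intro j hf hdig
    by_cases hjm : m ≤ j
    · omega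
    · have h1 := hdig j le_rfl (by omega)
      have hjlen : j < t.length := by omega
      rw [pvRunEnd, if_pos ⟨hjlen, h1⟩]
      have := ih (j + 1) (by omega) (fun k hk1 hk2 => hdig k (by omega) hk2)
      have := pvRunEnd_ge t n (j + 1)
      omega

theorem pvYearB_shape (t : List Char) :
    ∀ (fuel i a b : Nat), pvYearB t fuel i = some (a, b) → b = a + 4 ∧ a + 4 ≤ t.length := by
  intro fuel
  induction fuel with
  | zero => intro i a b h; cases h
  | succ n ih =>
    intro i a b h
    by_cases hi : i < t.length
    · rw [pvYearB, if_pos hi] at h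
      split at h
      · next hd =>
        split at h
        · next hg =>
          cases h
          have h1 := pvRunEnd_ge t t.length i
          have h2 := pvRunEnd_le t t.length i (by omega)
          exact ⟨by omega, by omega⟩
        · exact ih _ a b h
      · exact ih _ a b h
    · rw [pvYearB, if_neg hi] at h
      cases h

theorem pvYear_equiv (t : List Char) :
    ∀ (d i fuelA fuelB : Nat), t.length - i ≤ d →
      t.length - i < fuelA → t.length - i < fuelB →
      (i = 0 ∨ PySem.Chars.isdigit (t.getD (i - 1) ' ') = false) →
      pvYearA t fuelA i = (pvYearB t fuelB i).map Prod.fst := by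
  intro d
  induction d using Nat.strong_induction_on with
  | _ d ih =>
  intro i fuelA fuelB hd hfA hfB hb
  cases fuelB with
  | zero => omega
  | succ g =>
  by_cases hi : i < t.length
  case neg =>
    rw [pvYearA_ge t fuelA i (by omega), pvYearB, if_neg hi]
    rfl
  case pos =>
  cases hdig : PySem.Chars.isdigit (t.getD i ' ') with
  | false =>
    have hA : pvYearA t fuelA i = pvYearA t (fuelA - 1) (i + 1) := by
      cases fuelA with
      | zero => omega
      | succ m => exact pvYearA_step t m i (pvCondA_false_of_nondigit t i hi hdig)
    rw [hA, pvYearB, if_pos hi, if_neg (by simp only [Bool.not_eq_true]; exact hdig)]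
    have hA2 : pvYearA t (fuelA - 1) (i + 1) = pvYearA t fuelA (i + 1) := by
      by_cases hi1 : i + 1 < t.length
      · exact pvYearA_irrel t (fuelA - 1) fuelA (i + 1) (by omega) (by omega)
      · rw [pvYearA_ge t _ _ (by omega), pvYearA_ge t _ _ (by omega)]
    rw [hA2]
    exact ih (t.length - (i + 1)) (by omega) (i + 1) fuelA g (le_rfl)
      (by omega) (by omega) (Or.inr hdig)
  | true =>
    have hji : i < pvRunEnd t t.length i := by
      have h1 : (0 : Nat) < t.length := by omega
      obtain ⟨m, hm⟩ : ∃ m, t.length = m + 1 := ⟨t.length - 1, by omega⟩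
      rw [hm, pvRunEnd, if_pos ⟨hi, hdig⟩]
      have := pvRunEnd_ge t m (i + 1)
      omega
    have hjle : pvRunEnd t t.length i ≤ t.length := pvRunEnd_le t t.length i (by omega)
    by_cases hg : (pvRunEnd t t.length i - i = 4
        ∧ ((PySem.List.slice t (some (i : Int)) (some ((i : Int) + 2)) = "19".toList)
          ∨ (PySem.List.slice t (some (i : Int)) (some ((i : Int) + 2)) = "20".toList)))
    · have hB : pvYearB t (g + 1) i = some (i, pvRunEnd t t.length i) := by
        rw [pvYearB, if_pos hi, if_pos (by rw [hdig]), if_pos hg]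
      have hj4 : pvRunEnd t t.length i = i + 4 := by omega
      have hcond : pvCondA t i = true := by
        rw [pvCondA_iff]
        refine ⟨?_, ?_, hb, ?_⟩
        · have := hg.2
          rw [pvSlice2] at this
          exact this
        · have h4 : (4 : Nat) = (i + 4) - i := by omega
          rw [h4]
          exact pvTake_digits t i (i + 4) (by omega) (by omega)
            (fun k hk1 hk2 => (pvRunEnd_digits t t.length i k hk1 (by omega)).2)
        · by_cases hlen : t.length ≤ i + 4
          · exact Or.inl hlen
          · right
            have := pvRunEnd_stop t t.length i (by omega) (by omega)
            rwa [hj4] at this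
      have hA : pvYearA t fuelA i = some i := by
        cases fuelA with
        | zero => omega
        | succ m =>
          rw [pvYearA, if_pos (by omega), hcond]
          simp
      rw [hA, hB]
      rfl
    · have hB : pvYearB t (g + 1) i = pvYearB t g (pvRunEnd t t.length i) := by
        rw [pvYearB, if_pos hi, if_pos (by rw [hdig]), if_neg hg]
      have hchain : pvYearA t fuelA i = pvYearA t fuelA (pvRunEnd t t.length i) := by
        apply pvYearA_chain t (pvRunEnd t t.length i - i) i fuelA fuelA
          (pvRunEnd t t.length i) (by omega) (by omega) (by omega) (by omega)
        intro k hk1 hk2 hk3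
        by_cases hki : k = i
        · subst hki
          rw [Bool.eq_false_iff]
          intro hcond
          obtain ⟨h19, hdig4, -, hr⟩ := (pvCondA_iff t k).mp hcond
          have hk4 : k + 4 ≤ t.length := by omega
          have hdigits := pvTake4_digits t k hk4 hdig4
          have hge : k + 4 ≤ max k (pvRunEnd t t.length k) :=
            pvRunEnd_max t (k + 4) hk4 t.length k (by omega) hdigits
          have hge' : k + 4 ≤ pvRunEnd t t.length k := by omega
          have hle4 : pvRunEnd t t.length k ≤ k + 4 := by
            rcases hr with h | h
            · omega
            · by_contra hgt
              have := (pvRunEnd_digits t t.length k (k + 4) (by omega) (by omega)).2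
              rw [this] at h
              cases h
          exact hg ⟨by omega, by rw [pvSlice2]; exact h19⟩
        · have hprev : PySem.Chars.isdigit (t.getD (k - 1) ' ') = true :=
            (pvRunEnd_digits t t.length i (k - 1) (by omega) (by omega)).2
          exact pvCondA_false_of_prev_digit t k (by omega) hprev
      by_cases hjlen : pvRunEnd t t.length i < t.length
      · have hjd : PySem.Chars.isdigit (t.getD (pvRunEnd t t.length i) ' ') = false :=
          pvRunEnd_stop t t.length i (by omega) hjlen
        have hA2 : pvYearA t fuelA (pvRunEnd t t.length i)
            = pvYearA t (fuelA - 1) (pvRunEnd t t.length i + 1) := by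
          cases fuelA with
          | zero => omega
          | succ m =>
            have := pvYearA_step t m (pvRunEnd t t.length i)
              (pvCondA_false_of_nondigit t _ hjlen hjd)
            simpa using this
        have hB2 : pvYearB t g (pvRunEnd t t.length i)
            = pvYearB t (g - 1) (pvRunEnd t t.length i + 1) := by
          cases hgz : g with
          | zero => omega
          | succ m =>
            rw [pvYearB, if_pos hjlen, if_neg (by simp only [Bool.not_eq_true]; exact hjd)]
            rfl
        rw [hchain, hB, hA2, hB2]
        exact ih (t.length - (pvRunEnd t t.length i + 1)) (by omega)
          (pvRunEnd t t.length i + 1) (fuelA - 1) (g - 1) le_rfl (by omega) (by omega)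
          (Or.inr hjd)
      · have hjlen' : pvRunEnd t t.length i = t.length := by omega
        rw [hchain, hB, hjlen', pvYearA_ge t fuelA t.length (by omega)]
        cases g with
        | zero => rfl
        | succ m => rw [pvYearB, if_neg (by omega)]; rfl

theorem pvMakeKey_eq (t : List Char) : pvMakeKeyA t = pvMakeKeyB t := by
  have h := pvYear_equiv t t.length 0 (t.length + 1) (t.length + 1) (by omega)
    (by omega) (by omega) (Or.inl rfl)
  unfold pvMakeKeyA pvMakeKeyB
  cases hB : pvYearB t (t.length + 1) 0 with
  | none => rw [hB] at h; rw [h]; rfl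
  | some ab =>
    obtain ⟨a, b⟩ := ab
    rw [hB] at h
    simp only [Option.map_some] at h
    obtain ⟨hb4, -⟩ := pvYearB_shape t (t.length + 1) 0 a b hB
    subst hb4
    rw [h]
    show pvKeyYear t a (PySem.List.slice t (some (a : Int)) (some ((a : Int) + 4)))
      = pvKeyYear t a (PySem.List.slice t (some (a : Int)) (some ((a + 4 : Nat) : Int)))
    have hc : ((a : Int) + 4) = ((a + 4 : Nat) : Int) := by push_cast; ring
    rw [hc]

-- ---- one-step unfoldings of B's loop ----
theorem pvLoopB_stop (cs : List Char) (bm pm : PySem.Dict Nat Nat) (fuel i : Nat)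
    (acc : List Char) (hi : ¬ i < cs.length) :
    pvLoopB cs bm pm fuel i acc = acc := by
  cases fuel with
  | zero => rfl
  | succ n => rw [pvLoopB, if_neg hi]

theorem pvLoopB_step_notbr (cs : List Char) (bm pm : PySem.Dict Nat Nat) (fuel i : Nat)
    (acc : List Char) (hi : i < cs.length) (hch : ¬ cs.getD i ' ' = '[') :
    pvLoopB cs bm pm (fuel + 1) i acc = pvLoopB cs bm pm fuel (i + 1) (acc ++ [cs.getD i ' ']) := by
  rw [pvLoopB, if_pos hi, if_neg hch]

theorem pvLoopB_step_none (cs : List Char) (bm pm : PySem.Dict Nat Nat) (fuel i : Nat)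
    (acc : List Char) (hi : i < cs.length) (hch : cs.getD i ' ' = '[')
    (hm : bm.get? i = none) :
    pvLoopB cs bm pm (fuel + 1) i acc = pvLoopB cs bm pm fuel (i + 1) (acc ++ [cs.getD i ' ']) := by
  rw [pvLoopB, if_pos hi, if_pos hch]
  split
  · next m heq => simp [hm] at heq
  · rfl

theorem pvLoopB_step_nohit (cs : List Char) (bm pm : PySem.Dict Nat Nat) (fuel i m : Nat)
    (acc : List Char) (hi : i < cs.length) (hch : cs.getD i ' ' = '[')
    (hm : bm.get? i = some m) (hpm : pm.get? (m + 1) = none) :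
    pvLoopB cs bm pm (fuel + 1) i acc = pvLoopB cs bm pm fuel (i + 1) (acc ++ [cs.getD i ' ']) := by
  rw [pvLoopB, if_pos hi, if_pos hch]
  split
  · next m' heq =>
    rw [hm] at heq
    cases heq
    split
    · next e heq' => simp [hpm] at heq'
    · rfl
  · next heq => simp [hm] at heq

theorem pvLoopB_step_hit (cs : List Char) (bm pm : PySem.Dict Nat Nat) (fuel i m e : Nat)
    (acc : List Char) (hi : i < cs.length) (hch : cs.getD i ' ' = '[')
    (hm : bm.get? i = some m) (hpm : pm.get? (m + 1) = some e) :
    pvLoopB cs bm pm (fuel + 1) i acc = pvLoopB cs bm pm fuel (e + 1)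
      (acc ++ pvCite (pvMakeKeyB (PySem.List.slice cs (some ((i : Int) + 1)) (some (m : Int))))) := by
  rw [pvLoopB, if_pos hi, if_pos hch]
  split
  · next m' heq =>
    rw [hm] at heq
    cases heq
    split
    · next e' heq' =>
      rw [hpm] at heq'
      cases heq'
      rfl
    · next heq' => simp [hpm] at heq'
  · next heq => simp [hm] at heq

-- ---- the main loops agree ----
theorem pv_main (cs : List Char) :
    ∀ (fuelA fuelB i : Nat) (acc : List Char),
      cs.length - i < fuelA → cs.length - i < fuelB →
      pvLoopA cs fuelA i acc =
        pvLoopB cs (pvMatch cs '[' ']') (pvMatch cs '(' ')') fuelB i acc := by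
  intro fuelA
  induction fuelA with
  | zero => intro fuelB i acc hfA hfB; omega
  | succ n ih =>
    intro fuelB i acc hfA hfB
    cases fuelB with
    | zero => omega
    | succ g =>
    by_cases hi : i < cs.length
    · have hsA : pvScanA cs '[' ']' (cs.length + 1) (i + 1) 1
          = pvScanTo cs '[' ']' cs.length (i + 1) 1 :=
        pvScanA_eq_scanTo cs '[' ']' (cs.length + 1) (i + 1) 1 (by omega)
      by_cases hch : cs.getD i ' ' = '['
      · cases hbm : (pvMatch cs '[' ']').get? i with
        | none =>
          rw [pvLoopB_step_none cs _ _ g i acc hi hch hbm]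
          by_cases hlt : i < cs.length - 1
          · have hscan := pvMatch_none cs '[' ']' (by decide) i hi hch hbm
            rw [pvLoopA, if_pos hi, if_pos ⟨hch, hlt⟩,
              if_neg (fun hcon => hscan (by rw [← hsA]; exact hcon.1))]
            exact ih g (i + 1) _ (by omega) (by omega)
          · rw [pvLoopA, if_pos hi, if_neg (fun hcon => hlt hcon.2)]
            exact ih g (i + 1) _ (by omega) (by omega)
        | some m =>
          obtain ⟨him, hmlen, -, hscan⟩ := pvMatch_some cs '[' ']' (by decide) i m hbm
          rw [← hsA] at hscan
          have hlt : i < cs.length - 1 := by omega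
          have hsP : pvScanA cs '(' ')' (cs.length + 1) ((m + 1) + 1) 1
              = pvScanTo cs '(' ')' cs.length ((m + 1) + 1) 1 :=
            pvScanA_eq_scanTo cs '(' ')' (cs.length + 1) ((m + 1) + 1) 1 (by omega)
          cases hpm : (pvMatch cs '(' ')').get? (m + 1) with
          | some e =>
            obtain ⟨hme, helen, hpchar, hpscan⟩ :=
              pvMatch_some cs '(' ')' (by decide) (m + 1) e hpm
            rw [← hsP] at hpscan
            rw [pvLoopB_step_hit cs _ _ g i m e acc hi hch hbm hpm]
            rw [pvLoopA, if_pos hi, if_pos ⟨hch, hlt⟩,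
              if_pos ⟨by rw [hscan], by rw [hscan]; exact (by omega : m + 1 < cs.length),
                by rw [hscan]; exact hpchar⟩,
              if_pos (by rw [hscan]; exact (by rw [hpscan] :
                (pvScanA cs '(' ')' (cs.length + 1) ((m + 1, 0).1 + 1) 1).2 = 0))]
            rw [hscan, hpscan]
            have hcast : (((m + 1, 0).1 : Nat) : Int) - 1 = (m : Int) := by push_cast; ring
            rw [hcast, pvMakeKey_eq]
            exact ih g (e + 1) _ (by omega) (by omega)
          | none =>
            rw [pvLoopB_step_nohit cs _ _ g i m acc hi hch hbm hpm]
            by_cases hb2 : m + 1 < cs.length ∧ cs.getD (m + 1) ' ' = '('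
            · have hpscan := pvMatch_none cs '(' ')' (by decide) (m + 1) hb2.1 hb2.2 hpm
              rw [← hsP] at hpscan
              rw [pvLoopA, if_pos hi, if_pos ⟨hch, hlt⟩,
                if_pos ⟨by rw [hscan], by rw [hscan]; exact hb2.1, by rw [hscan]; exact hb2.2⟩,
                if_neg (by rw [hscan]; exact (by simpa using hpscan :
                  ¬ (pvScanA cs '(' ')' (cs.length + 1) ((m + 1, 0).1 + 1) 1).2 = 0))]
              exact ih g (i + 1) _ (by omega) (by omega)
            · rw [pvLoopA, if_pos hi, if_pos ⟨hch, hlt⟩,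
                if_neg (fun hcon => hb2 ⟨by rw [hscan] at hcon; exact hcon.2.1,
                  by rw [hscan] at hcon; exact hcon.2.2⟩)]
              exact ih g (i + 1) _ (by omega) (by omega)
      · rw [pvLoopA, if_pos hi, if_neg (fun hcon => hch hcon.1),
          pvLoopB_step_notbr cs _ _ g i acc hi hch]
        exact ih g (i + 1) _ (by omega) (by omega)
    · rw [pvLoopA, if_neg hi, pvLoopB_stop cs _ _ (g + 1) i acc hi]

-- ===== VERDICT (by name: the statement is the Claim_ definition above) =====
theorem clean_citations_spec : Claim_equal_clean_citations := by
  intro content _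
  unfold Spec_clean_citations clean_citations clean_citations_alt
  rw [pv_main content.toList (content.toList.length + 1) (content.toList.length + 1) 0 []
    (by omega) (by omega)]
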